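-- pv_equiv track=rewrite | github.com/lu6ax/Flask_template_TM | app/views/Statement.py | organiser_actifs_par_type
-- ===== SOURCE A (Python) =====
-- def organiser_actifs_par_type(actifs):
--     actifs_organises = {'Comptes': [],'Immeuble': [],'Appartements': [], 'Actions': [], 'Obligation': [], 'Cryptomonnaie': []}  # Initialisez selon les types que vous avez
--     for actif in actifs:
--         if actif['IDImmeuble']:
--             actifs_organises['Immeuble'].append(actif)
--         elif actif['IDAction']:
--             actifs_organises['Actions'].append(actif)
--         elif actif['IDObligation']:
--             actifs_organises['Obligation'].append(actif)
--         elif actif['IDCompte']: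
--             actifs_organises['Comptes'].append(actif)
--         elif actif['IDAppartement']:
--             actifs_organises['Appartements'].append(actif)
--         elif actif['IDCryptomonnaie']:
--             actifs_organises['Cryptomonnaie'].append(actif)
--     return actifs_organises
-- ===== SOURCE B (Python) =====
-- PRIORITY = [('IDImmeuble', 'Immeuble'), ('IDAction', 'Actions'),
--             ('IDObligation', 'Obligation'), ('IDCompte', 'Comptes'),
--             ('IDAppartement', 'Appartements'), ('IDCryptomonnaie', 'Cryptomonnaie')]
--
--
-- def _categorie(actif):
--     for champ, cat in PRIORITY:
--         if actif[champ]: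
--             return cat
--     return None
--
--
-- def organiser_actifs_par_type(actifs):
--     return {cat: [a for a in actifs if _categorie(a) == cat]
--             for cat in ('Comptes', 'Immeuble', 'Appartements', 'Actions',
--                         'Obligation', 'Cryptomonnaie')}
-- ===== Notes on version B (the rewrite author's own statement) =====
-- stated objective: idiomatic
-- what changed: A does one pass appending each actif into a mutable bucket via an elif chain; B classifies each actif with a table-driven priority lookup and builds the result as a dict comprehension of six filter passes (one per category).
import Mathlib
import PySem

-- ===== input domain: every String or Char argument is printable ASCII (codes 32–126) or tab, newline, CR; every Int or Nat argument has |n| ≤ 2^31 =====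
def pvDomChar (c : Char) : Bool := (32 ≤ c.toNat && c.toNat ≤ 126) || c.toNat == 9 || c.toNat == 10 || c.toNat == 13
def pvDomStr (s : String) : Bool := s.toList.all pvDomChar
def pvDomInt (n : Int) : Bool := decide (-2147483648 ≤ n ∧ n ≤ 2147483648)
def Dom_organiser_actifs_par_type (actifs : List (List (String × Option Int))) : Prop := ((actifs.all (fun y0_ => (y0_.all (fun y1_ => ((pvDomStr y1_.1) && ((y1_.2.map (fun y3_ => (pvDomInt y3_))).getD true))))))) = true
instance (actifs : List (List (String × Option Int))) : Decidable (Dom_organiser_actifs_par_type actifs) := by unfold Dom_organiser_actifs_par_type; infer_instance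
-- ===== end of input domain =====

-- B replaces A's single-pass elif-chain bucketing by a table-driven classifier plus one filter pass
-- per category (idiomatic dict comprehension); equal return value on all inputs where A raises no KeyError.


-- shared accessor: Python's truth test 'if actif[k]:' ; a missing key is a KeyError (excluded by Pre_),
-- here totalized to false
def pvLook (a : List (String × Option Int)) (k : String) : Bool :=
  match (PySem.Dict.mk a).get? k with
  | some (some v) => v != 0
  | _ => false

-- ===== PORT A =====
def organiser_actifs_par_type (actifs : List (List (String × Option Int))) : List (String × List (List (String × Option Int))) :=
  (actifs.foldl (fun d actif =>
      if pvLook actif "IDImmeuble" then d.modify "Immeuble" [] (· ++ [actif])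
      else if pvLook actif "IDAction" then d.modify "Actions" [] (· ++ [actif])
      else if pvLook actif "IDObligation" then d.modify "Obligation" [] (· ++ [actif])
      else if pvLook actif "IDCompte" then d.modify "Comptes" [] (· ++ [actif])
      else if pvLook actif "IDAppartement" then d.modify "Appartements" [] (· ++ [actif])
      else if pvLook actif "IDCryptomonnaie" then d.modify "Cryptomonnaie" [] (· ++ [actif])
      else d)
    (PySem.Dict.ofList [("Comptes", []), ("Immeuble", []), ("Appartements", []),
                        ("Actions", []), ("Obligation", []), ("Cryptomonnaie", [])])).items

-- ===== PORT B =====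
def pvPriority : List (String × String) :=
  [("IDImmeuble", "Immeuble"), ("IDAction", "Actions"), ("IDObligation", "Obligation"),
   ("IDCompte", "Comptes"), ("IDAppartement", "Appartements"), ("IDCryptomonnaie", "Cryptomonnaie")]

-- B's _categorie: first table entry whose field is truthy
def pvCategorie (a : List (String × Option Int)) : Option String :=
  (pvPriority.find? (fun p => pvLook a p.1)).map (·.2)

def organiser_actifs_par_type_alt (actifs : List (List (String × Option Int))) : List (String × List (List (String × Option Int))) :=
  (["Comptes", "Immeuble", "Appartements", "Actions", "Obligation", "Cryptomonnaie"].foldl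
      (fun d cat => d.insert cat (actifs.filter (fun a => pvCategorie a == some cat)))
      PySem.Dict.empty).items

-- ===== PRECONDITION & SPEC =====
-- Pre_ excludes exactly the inputs on which Python A raises KeyError: some actif is missing a key
-- at the point the elif chain would read it (all earlier fields present and falsy).
def pvHas (a : List (String × Option Int)) (k : String) : Bool := (PySem.Dict.mk a).contains k

def pvChainOK (a : List (String × Option Int)) : Bool :=
  pvHas a "IDImmeuble" && (pvLook a "IDImmeuble" ||
    (pvHas a "IDAction" && (pvLook a "IDAction" ||
      (pvHas a "IDObligation" && (pvLook a "IDObligation" ||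
        (pvHas a "IDCompte" && (pvLook a "IDCompte" ||
          (pvHas a "IDAppartement" && (pvLook a "IDAppartement" ||
            pvHas a "IDCryptomonnaie")))))))))

def Pre_organiser_actifs_par_type (actifs : List (List (String × Option Int))) : Prop :=
  actifs.all pvChainOK = true
instance (actifs : List (List (String × Option Int))) : Decidable (Pre_organiser_actifs_par_type actifs) := by
  unfold Pre_organiser_actifs_par_type; infer_instance

def pvWitness_organiser_actifs_par_type : (List (List (String × Option Int))) :=
  [[("IDImmeuble", some 1), ("IDAction", none), ("IDObligation", none),
    ("IDCompte", none), ("IDAppartement", none), ("IDCryptomonnaie", none)],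
   [("IDImmeuble", none), ("IDAction", some 0), ("IDObligation", none),
    ("IDCompte", some 7), ("IDAppartement", none), ("IDCryptomonnaie", none)]]

def Spec_organiser_actifs_par_type (actifs : List (List (String × Option Int))) (out : List (String × List (List (String × Option Int)))) : Prop := out = organiser_actifs_par_type_alt actifs
instance (actifs : List (List (String × Option Int))) (out : List (String × List (List (String × Option Int)))) : Decidable (Spec_organiser_actifs_par_type actifs out) := by unfold Spec_organiser_actifs_par_type; infer_instance

-- ===== CLAIM (what is proved, stated in full; the proofs are below) =====
def Claim_equal_organiser_actifs_par_type : Prop := ∀ (actifs : List (List (String × Option Int))), Dom_organiser_actifs_par_type actifs → Pre_organiser_actifs_par_type actifs → Spec_organiser_actifs_par_type actifs (organiser_actifs_par_type actifs)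

-- ===== LEMMAS AND PROOFS =====

-- how one step of A's loop acts on the six-bucket literal dict (one lemma per bucket)
@[simp] theorem pv_modImmeuble (lC lI lAp lAc lO lCr : List (List (String × Option Int))) (a : List (String × Option Int)) :
    (PySem.Dict.mk [("Comptes", lC), ("Immeuble", lI), ("Appartements", lAp), ("Actions", lAc), ("Obligation", lO), ("Cryptomonnaie", lCr)]).modify "Immeuble" [] (· ++ [a]) =
    PySem.Dict.mk [("Comptes", lC), ("Immeuble", lI ++ [a]), ("Appartements", lAp), ("Actions", lAc), ("Obligation", lO), ("Cryptomonnaie", lCr)] := rfl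

@[simp] theorem pv_modActions (lC lI lAp lAc lO lCr : List (List (String × Option Int))) (a : List (String × Option Int)) :
    (PySem.Dict.mk [("Comptes", lC), ("Immeuble", lI), ("Appartements", lAp), ("Actions", lAc), ("Obligation", lO), ("Cryptomonnaie", lCr)]).modify "Actions" [] (· ++ [a]) =
    PySem.Dict.mk [("Comptes", lC), ("Immeuble", lI), ("Appartements", lAp), ("Actions", lAc ++ [a]), ("Obligation", lO), ("Cryptomonnaie", lCr)] := rfl

@[simp] theorem pv_modObligation (lC lI lAp lAc lO lCr : List (List (String × Option Int))) (a : List (String × Option Int)) :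
    (PySem.Dict.mk [("Comptes", lC), ("Immeuble", lI), ("Appartements", lAp), ("Actions", lAc), ("Obligation", lO), ("Cryptomonnaie", lCr)]).modify "Obligation" [] (· ++ [a]) =
    PySem.Dict.mk [("Comptes", lC), ("Immeuble", lI), ("Appartements", lAp), ("Actions", lAc), ("Obligation", lO ++ [a]), ("Cryptomonnaie", lCr)] := rfl

@[simp] theorem pv_modComptes (lC lI lAp lAc lO lCr : List (List (String × Option Int))) (a : List (String × Option Int)) :
    (PySem.Dict.mk [("Comptes", lC), ("Immeuble", lI), ("Appartements", lAp), ("Actions", lAc), ("Obligation", lO), ("Cryptomonnaie", lCr)]).modify "Comptes" [] (· ++ [a]) =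
    PySem.Dict.mk [("Comptes", lC ++ [a]), ("Immeuble", lI), ("Appartements", lAp), ("Actions", lAc), ("Obligation", lO), ("Cryptomonnaie", lCr)] := rfl

@[simp] theorem pv_modAppartements (lC lI lAp lAc lO lCr : List (List (String × Option Int))) (a : List (String × Option Int)) :
    (PySem.Dict.mk [("Comptes", lC), ("Immeuble", lI), ("Appartements", lAp), ("Actions", lAc), ("Obligation", lO), ("Cryptomonnaie", lCr)]).modify "Appartements" [] (· ++ [a]) =
    PySem.Dict.mk [("Comptes", lC), ("Immeuble", lI), ("Appartements", lAp ++ [a]), ("Actions", lAc), ("Obligation", lO), ("Cryptomonnaie", lCr)] := rfl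

@[simp] theorem pv_modCrypto (lC lI lAp lAc lO lCr : List (List (String × Option Int))) (a : List (String × Option Int)) :
    (PySem.Dict.mk [("Comptes", lC), ("Immeuble", lI), ("Appartements", lAp), ("Actions", lAc), ("Obligation", lO), ("Cryptomonnaie", lCr)]).modify "Cryptomonnaie" [] (· ++ [a]) =
    PySem.Dict.mk [("Comptes", lC), ("Immeuble", lI), ("Appartements", lAp), ("Actions", lAc), ("Obligation", lO), ("Cryptomonnaie", lCr ++ [a])] := rfl

-- A's fold, started from the six buckets holding lC…lCr, ends with each bucket extended by
-- the actifs B classifies into that category.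
theorem pv_foldA (actifs : List (List (String × Option Int)))
    (lC lI lAp lAc lO lCr : List (List (String × Option Int))) :
    (actifs.foldl (fun d actif =>
      if pvLook actif "IDImmeuble" then d.modify "Immeuble" [] (· ++ [actif])
      else if pvLook actif "IDAction" then d.modify "Actions" [] (· ++ [actif])
      else if pvLook actif "IDObligation" then d.modify "Obligation" [] (· ++ [actif])
      else if pvLook actif "IDCompte" then d.modify "Comptes" [] (· ++ [actif])
      else if pvLook actif "IDAppartement" then d.modify "Appartements" [] (· ++ [actif])
      else if pvLook actif "IDCryptomonnaie" then d.modify "Cryptomonnaie" [] (· ++ [actif])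
      else d)
      (PySem.Dict.mk [("Comptes", lC), ("Immeuble", lI), ("Appartements", lAp),
                      ("Actions", lAc), ("Obligation", lO), ("Cryptomonnaie", lCr)])) =
    PySem.Dict.mk
      [("Comptes", lC ++ actifs.filter (fun a => pvCategorie a == some "Comptes")),
       ("Immeuble", lI ++ actifs.filter (fun a => pvCategorie a == some "Immeuble")),
       ("Appartements", lAp ++ actifs.filter (fun a => pvCategorie a == some "Appartements")),
       ("Actions", lAc ++ actifs.filter (fun a => pvCategorie a == some "Actions")),
       ("Obligation", lO ++ actifs.filter (fun a => pvCategorie a == some "Obligation")),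
       ("Cryptomonnaie", lCr ++ actifs.filter (fun a => pvCategorie a == some "Cryptomonnaie"))] := by
  induction actifs generalizing lC lI lAp lAc lO lCr with
  | nil => simp
  | cons a rest ih =>
    cases h0 : pvLook a "IDImmeuble" <;>
    cases h1 : pvLook a "IDAction" <;>
    cases h2 : pvLook a "IDObligation" <;>
    cases h3 : pvLook a "IDCompte" <;>
    cases h4 : pvLook a "IDAppartement" <;>
    cases h5 : pvLook a "IDCryptomonnaie" <;>
    simp only [List.foldl_cons, h0, h1, h2, h3, h4, h5, Bool.false_eq_true, if_true, if_false,
      pv_modImmeuble, pv_modActions, pv_modObligation, pv_modComptes, pv_modAppartements,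
      pv_modCrypto, ih] <;>
    simp [pvCategorie, pvPriority, List.find?, h0, h1, h2, h3, h4, h5]

-- ===== VERDICT (by name: the statement is the Claim_ definition above) =====
theorem organiser_actifs_par_type_spec : Claim_equal_organiser_actifs_par_type := by
  intro actifs _ _
  unfold Spec_organiser_actifs_par_type organiser_actifs_par_type organiser_actifs_par_type_alt
  rw [show (PySem.Dict.ofList [("Comptes", ([] : List (List (String × Option Int)))), ("Immeuble", []),
    ("Appartements", []), ("Actions", []), ("Obligation", []), ("Cryptomonnaie", [])]) =
    PySem.Dict.mk [("Comptes", []), ("Immeuble", []), ("Appartements", []),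
                   ("Actions", []), ("Obligation", []), ("Cryptomonnaie", [])] from rfl]
  rw [pv_foldA]
  rfl
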